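-- pv_equiv track=rewrite | github.com/VictoriaZQY/EM-Merge | benchmark/logparser/LILAC/merge_template.py | find_sequence_indices
-- ===== SOURCE A (Python) =====
-- def find_subarray_indices(lst, subarray, start_index):
--     """查找块"""
--     sub_len = len(subarray)
--     for i in range(start_index, len(lst) - sub_len + 1):
--         if lst[i:i + sub_len] == subarray:
--             return i
--
-- def find_sequence_indices(lst, sequence):
--     """查找公共部分和私有部分"""
--     indices = []
--     start_index = 0
--     for item in sequence:
--         index = find_subarray_indices(lst, item, start_index)  # 查找块
--         indices.append(''.join(lst[start_index:index]))
--         indices.append(''.join(item))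
--         start_index = index + len(item)
--     indices.append(''.join(lst[start_index:]))
--     return indices
-- ===== SOURCE B (Python) =====
-- def find_sequence_indices(lst, sequence):
--     # index of positions of each value, built once; each block only probes
--     # positions where its first element actually occurs
--     pos = {}
--     for i, v in enumerate(lst):
--         pos.setdefault(v, []).append(i)
--     out = []
--     start = 0
--     for block in sequence:
--         if block:
--             index = None
--             for i in pos.get(block[0], []):
--                 if i >= start and lst[i:i + len(block)] == block:
--                     index = i
--                     break
--             if index is None:
--                 raise ValueError("block not found")
--         else:
--             index = start
--         out.append(''.join(lst[start:index]))
--         out.append(''.join(block))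
--         start = index + len(block)
--     out.append(''.join(lst[start:]))
--     return out
-- ===== Notes on version B (the rewrite author's own statement) =====
-- stated objective: alternative
-- what changed: B builds a value->positions index of lst once and, for each block, probes only the positions where the block's first element occurs (instead of slice-comparing at every index from start), raising ValueError instead of A's TypeError when a block is absent.
import Mathlib
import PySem

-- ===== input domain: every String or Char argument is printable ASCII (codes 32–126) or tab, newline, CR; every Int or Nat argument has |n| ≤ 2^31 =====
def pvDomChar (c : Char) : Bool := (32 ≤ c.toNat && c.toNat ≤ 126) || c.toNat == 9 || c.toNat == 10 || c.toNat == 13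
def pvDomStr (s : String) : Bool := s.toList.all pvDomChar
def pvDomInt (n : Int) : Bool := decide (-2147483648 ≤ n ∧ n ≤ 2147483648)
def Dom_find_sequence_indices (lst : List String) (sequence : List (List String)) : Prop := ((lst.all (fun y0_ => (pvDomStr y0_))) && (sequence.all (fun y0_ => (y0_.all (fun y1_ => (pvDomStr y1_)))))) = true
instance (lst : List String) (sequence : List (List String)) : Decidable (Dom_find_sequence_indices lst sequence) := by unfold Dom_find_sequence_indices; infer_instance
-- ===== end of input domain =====

-- B replaces A's scan of every index per block by a value→positions index of
-- lst built once, probing only positions where the block's first element occurs.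

-- ===== PORT A =====
def find_subarray_indices (lst : List String) (subarray : List String) (start_index : Int) : Option Int :=
  let sub_len : Int := subarray.length
  (PySem.List.pyRange start_index ((lst.length : Int) - sub_len + 1) 1).find?
    (fun i => PySem.List.slice lst (some i) (some (i + sub_len)) == subarray)

def pvFsiLoop (lst : List String) : List (List String) → List String → Int → List String
  | [], indices, start_index =>
      indices ++ [PySem.Str.join "" (PySem.List.slice lst (some start_index) none)]
  | item :: rest, indices, start_index =>
      match find_subarray_indices lst item start_index with
      | none => []  -- Python raises TypeError at 'index + len(item)'; excluded by Pre_
      | some index =>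
          pvFsiLoop lst rest
            (indices ++ [PySem.Str.join "" (PySem.List.slice lst (some start_index) (some index)),
                         PySem.Str.join "" item])
            (index + (item.length : Int))

def find_sequence_indices (lst : List String) (sequence : List (List String)) : List String :=
  pvFsiLoop lst sequence [] 0

-- ===== PORT B =====
def pvPos (lst : List String) : PySem.Dict String (List Int) :=
  (PySem.List.enumerate lst 0).foldl (fun d p => d.modify p.2 [] (· ++ [p.1])) PySem.Dict.empty

def pvAltFind (lst : List String) (pos : PySem.Dict String (List Int))
    (block : List String) (start : Int) : Option Int :=
  match block with
  | [] => some start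
  | b0 :: _ =>
      (pos.getD b0 []).find?
        (fun i => decide (start ≤ i) &&
          (PySem.List.slice lst (some i) (some (i + (block.length : Int))) == block))

def pvAltLoop (lst : List String) (pos : PySem.Dict String (List Int)) :
    List (List String) → List String → Int → List String
  | [], out, start => out ++ [PySem.Str.join "" (PySem.List.slice lst (some start) none)]
  | block :: rest, out, start =>
      match pvAltFind lst pos block start with
      | none => []  -- B raises ValueError; excluded by Pre_
      | some index =>
          pvAltLoop lst pos rest
            (out ++ [PySem.Str.join "" (PySem.List.slice lst (some start) (some index)),
                     PySem.Str.join "" block])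
            (index + (block.length : Int))

def find_sequence_indices_alt (lst : List String) (sequence : List (List String)) : List String :=
  pvAltLoop lst (pvPos lst) sequence [] 0

-- ===== PRECONDITION & SPEC =====
-- Pre_ excludes exactly the inputs on which A raises TypeError (a block of
-- sequence has no occurrence in the rest of lst): the blocks must occur in
-- lst, in order, at non-overlapping positions.
def pvSeqFound : List String → List (List String) → Bool
  | _, [] => true
  | l, b :: bs =>
      (List.range (l.length + 1)).any
        (fun k => decide (b <+: l.drop k) && pvSeqFound (l.drop (k + b.length)) bs)

def Pre_find_sequence_indices (lst : List String) (sequence : List (List String)) : Prop :=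
  pvSeqFound lst sequence = true
instance (lst : List String) (sequence : List (List String)) : Decidable (Pre_find_sequence_indices lst sequence) := by unfold Pre_find_sequence_indices; infer_instance

def pvWitness_find_sequence_indices : List String × List (List String) :=
  (["a", "b", "c"], [["b"]])

def Spec_find_sequence_indices (lst : List String) (sequence : List (List String)) (out : List String) : Prop := out = find_sequence_indices_alt lst sequence
instance (lst : List String) (sequence : List (List String)) (out : List String) : Decidable (Spec_find_sequence_indices lst sequence out) := by unfold Spec_find_sequence_indices; infer_instance

-- ===== CLAIM (what is proved, stated in full; the proofs are below) =====
def Claim_equal_find_sequence_indices : Prop := ∀ (lst : List String) (sequence : List (List String)), Dom_find_sequence_indices lst sequence → Pre_find_sequence_indices lst sequence → Spec_find_sequence_indices lst sequence (find_sequence_indices lst sequence)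

-- ===== LEMMAS AND PROOFS =====

theorem pv_find?_min {p : Int → Bool} {a : Int} :
    ∀ {xs : List Int}, xs.Pairwise (· < ·) → xs.find? p = some a →
      ∀ b ∈ xs, p b = true → a ≤ b := by
  intro xs
  induction xs with
  | nil => intro _ hf; simp at hf
  | cons x xs ih =>
    intro hp hf b hb hpb
    rw [List.pairwise_cons] at hp
    rw [List.find?_cons] at hf
    rw [List.mem_cons] at hb
    cases hpx : p x with
    | true =>
      rw [hpx] at hf; simp at hf; subst hf
      rcases hb with rfl | hb
      · exact le_rfl
      · exact le_of_lt (hp.1 b hb)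
    | false =>
      rw [hpx] at hf; simp at hf
      rcases hb with rfl | hb
      · rw [hpx] at hpb; cases hpb
      · exact ih hp.2 hf b hb hpb

theorem pv_find?_sorted_congr {xs ys : List Int} {p q : Int → Bool}
    (hxs : xs.Pairwise (· < ·)) (hys : ys.Pairwise (· < ·))
    (h : ∀ i, (i ∈ xs ∧ p i = true) ↔ (i ∈ ys ∧ q i = true)) :
    xs.find? p = ys.find? q := by
  cases hfx : xs.find? p with
  | none =>
    rw [List.find?_eq_none] at hfx
    symm; rw [List.find?_eq_none]
    intro y hy hqy
    have := (h y).mpr ⟨hy, hqy⟩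
    exact hfx y this.1 this.2
  | some a =>
    have hax : a ∈ xs := List.mem_of_find?_eq_some hfx
    have hpa : p a = true := List.find?_some hfx
    have hay : a ∈ ys ∧ q a = true := (h a).mp ⟨hax, hpa⟩
    cases hfy : ys.find? q with
    | none =>
      rw [List.find?_eq_none] at hfy
      exact absurd hay.2 (hfy a hay.1)
    | some c =>
      have hcy : c ∈ ys := List.mem_of_find?_eq_some hfy
      have hqc : q c = true := List.find?_some hfy
      have hcx : c ∈ xs ∧ p c = true := (h c).mpr ⟨hcy, hqc⟩
      have h1 : a ≤ c := pv_find?_min hxs hfx c hcx.1 hcx.2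
      have h2 : c ≤ a := pv_find?_min hys hfy a hay.1 hay.2
      exact congrArg some (le_antisymm h1 h2)

theorem pvPos_getD (lst : List String) (b0 : String) :
    (pvPos lst).getD b0 [] =
      ((PySem.List.enumerate lst 0).filter (fun p => p.2 == b0)).map (·.1) := by
  unfold pvPos
  have hm : (PySem.List.enumerate lst 0).foldl (fun d p => d.modify p.2 [] (· ++ [p.1])) PySem.Dict.empty
      = ((PySem.List.enumerate lst 0).map Prod.swap).foldl
          (fun d p => d.modify p.1 [] (· ++ [p.2])) PySem.Dict.empty := by
    rw [List.foldl_map]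
    rfl
  rw [hm, PySem.Dict.getD_foldl_modify_append, List.filter_map, List.map_map]
  rfl

theorem pv_mem_positions (lst : List String) (b0 : String) (i : Int) :
    i ∈ ((PySem.List.enumerate lst 0).filter (fun p => p.2 == b0)).map (·.1) ↔
      ∃ (k : Nat) (_ : k < lst.length), i = (k : Int) ∧ lst[k] = b0 := by
  simp only [List.mem_map, List.mem_filter]
  constructor
  · rintro ⟨p, ⟨hpmem, hpv⟩, rfl⟩
    rw [PySem.List.mem_enumerate_iff] at hpmem
    obtain ⟨k, hk, rfl⟩ := hpmem
    exact ⟨k, hk, by simp, by simpa using (beq_iff_eq.mp (by simpa using hpv))⟩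
  · rintro ⟨k, hk, rfl, hv⟩
    refine ⟨((k : Int), lst[k]), ⟨?_, by simp [hv]⟩, rfl⟩
    rw [PySem.List.mem_enumerate_iff]
    exact ⟨k, hk, by simp⟩

theorem pv_sorted_positions (lst : List String) (b0 : String) :
    (((PySem.List.enumerate lst 0).filter (fun p => p.2 == b0)).map (·.1)).Pairwise (· < ·) := by
  apply List.Pairwise.map (R := fun p q : Int × String => p.1 < q.1)
  · intro a b h; exact h
  · exact (PySem.List.pairwise_lt_enumerate lst 0).filter _

theorem pv_find_eq (lst : List String) (block : List String) (start : Int)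
    (h0 : 0 ≤ start) (hn : start ≤ (lst.length : Int)) :
    find_subarray_indices lst block start = pvAltFind lst (pvPos lst) block start := by
  match block with
  | [] =>
    simp only [find_subarray_indices, pvAltFind, List.length_nil, Nat.cast_zero]
    have hcons : PySem.List.pyRange start ((lst.length : Int) - 0 + 1) 1
        = start :: PySem.List.pyRange (start + 1) ((lst.length : Int) - 0 + 1) 1 := by
      exact PySem.List.pyRange_one_cons (by omega)
    have hsl : PySem.List.slice lst (some start) (some start) = ([] : List String) := by
      rw [PySem.List.slice_toNat lst h0 h0]
      simp
    rw [hcons, List.find?_cons_of_pos (by simp [hsl])]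
  | b0 :: bs =>
    simp only [find_subarray_indices, pvAltFind, pvPos_getD]
    apply pv_find?_sorted_congr (PySem.List.pairwise_lt_pyRange_one _ _)
      (pv_sorted_positions lst b0)
    intro i
    constructor
    · rintro ⟨hmem, hp⟩
      rw [PySem.List.mem_pyRange_one] at hmem
      have hi0 : 0 ≤ i := le_trans h0 hmem.1
      have hs : PySem.List.slice lst (some i) (some (i + ((b0 :: bs).length : Int))) = b0 :: bs := by
        simp only [beq_iff_eq] at hp
        exact hp
      rw [PySem.List.slice_toNat lst hi0 (by omega)] at hs
      have htk : (i + ((b0 :: bs).length : Int)).toNat - i.toNat = (b0 :: bs).length := by omega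
      rw [htk] at hs
      have hlen : (List.take (b0 :: bs).length (List.drop i.toNat lst)).length = (b0 :: bs).length := by
        rw [hs]
      simp only [List.length_take, List.length_drop] at hlen
      have hkn : i.toNat < lst.length := by
        simp only [List.length_cons] at hlen; omega
      have hhead : lst[i.toNat]'hkn = b0 := by
        cases hdrop : List.drop i.toNat lst with
        | nil => rw [hdrop] at hs; simp at hs
        | cons a l' =>
          rw [hdrop, List.length_cons, List.take_succ_cons] at hs
          have ha : a = b0 := (List.cons_eq_cons.mp hs).1
          have h3 : lst[i.toNat]? = some a := by
            have h4 : (List.drop i.toNat lst)[0]? = lst[i.toNat + 0]? := List.getElem?_drop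
            rw [hdrop] at h4
            simpa using h4.symm
          rw [List.getElem?_eq_getElem hkn] at h3
          exact (Option.some.inj h3).trans ha
      refine ⟨?_, ?_⟩
      · rw [pv_mem_positions]
        exact ⟨i.toNat, hkn, (Int.toNat_of_nonneg hi0).symm, hhead⟩
      · simp only [Bool.and_eq_true, decide_eq_true_eq]
        exact ⟨hmem.1, hp⟩
    · rintro ⟨hmem, hq⟩
      rw [pv_mem_positions] at hmem
      obtain ⟨k, hk, rfl, hv⟩ := hmem
      simp only [Bool.and_eq_true, decide_eq_true_eq] at hq
      obtain ⟨hstart, hp⟩ := hq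
      refine ⟨?_, hp⟩
      rw [PySem.List.mem_pyRange_one]
      refine ⟨hstart, ?_⟩
      have hs : PySem.List.slice lst (some (k : Int)) (some ((k : Int) + ((b0 :: bs).length : Int))) = b0 :: bs := by
        simpa using hp
      have hlenslice := PySem.List.length_slice lst (k : Int) ((k : Int) + ((b0 :: bs).length : Int))
      rw [hs] at hlenslice
      have hcast : (k : Int) + ((b0 :: bs).length : Int) = ((k + (b0 :: bs).length : Nat) : Int) := by push_cast; ring
      rw [hcast, PySem.List.clampIdx_natCast, PySem.List.clampIdx_natCast] at hlenslice
      omega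

theorem pv_loop_eq (lst : List String) :
    ∀ (seq : List (List String)) (acc : List String) (start : Int),
      0 ≤ start → start ≤ (lst.length : Int) →
      pvFsiLoop lst seq acc start = pvAltLoop lst (pvPos lst) seq acc start := by
  intro seq
  induction seq with
  | nil => intro acc start _ _; rfl
  | cons block rest ih =>
    intro acc start h0 hn
    simp only [pvFsiLoop, pvAltLoop]
    rw [← pv_find_eq lst block start h0 hn]
    cases hf : find_subarray_indices lst block start with
    | none => rfl
    | some index =>
      simp only [find_subarray_indices] at hf
      have hmem := List.mem_of_find?_eq_some hf
      rw [PySem.List.mem_pyRange_one] at hmem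
      exact ih _ _ (by omega) (by omega)

-- ===== VERDICT (by name: the statement is the Claim_ definition above) =====
theorem find_sequence_indices_spec : Claim_equal_find_sequence_indices := by
  intro lst sequence _ _
  unfold Spec_find_sequence_indices find_sequence_indices find_sequence_indices_alt
  exact pv_loop_eq lst sequence [] 0 le_rfl (by exact_mod_cast Int.natCast_nonneg lst.length)
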